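-- pv_equiv track=rewrite | github.com/Isidore-2001/Jeu_Puissance4 | projet.py | formation_de_quadruplet
-- ===== SOURCE A (Python) =====
-- def nr(g):
--     """
--     """
--     return len(g)
--
-- def nc(g):
--     return len(g[0])
--
-- def lc_r(r,c):
--     return [(r,c-3),(r,c-2),(r,c-1),(r,c),(r,c+1),(r,c+2),(r,c+3)]
--
-- def lc_c(r,c):
--     return [(r-3,c),(r-2,c),(r-1,c),(r,c),(r+1,c),(r+2,c),(r+3,c)]
--
-- def lc_diagonale(r,c):
--     l = []
--     for i in range(7):
--         l.append((r-3+i,c-3+i))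
--     return l
--
-- def lc_diagonale_2(r,c):
--     l = []
--     for i in range(7):
--         l.append((r+3-i,c-3+i))
--     return l
--
-- def formation_de_quadruplet(g,c,r):
--     l = []
--
--     l1 = lc_r(r,c)[lc_r(r,c).index((r,c)):lc_r(r,c).index((r,c))+4]
--
--     l2 = lc_c(r,c)[lc_c(r,c).index((r,c)):lc_c(r,c).index((r,c))+4]
--     l3 = lc_diagonale(r,c)[lc_c(r,c).index((r,c)):lc_c(r,c).index((r,c))+4]
--     l4 = lc_diagonale_2(r,c)[0:lc_c(r,c).index((r,c))+1]
--     l.append(l1)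
--     l.append(l2)
--     l.append(l3)
--     l.append(l4)
--     l_f = []
--     for c in l:
--         tmp = []
--         for k in c:
--             if 0 <= k[1] < nc(g) and  0 <= k[0] < nr(g):
--                 tmp.append(True)
--             else:
--                 tmp.append(False)
--         if all(tmp):
--             l_f.append(c)
--
--     return l_f
-- ===== SOURCE B (Python) =====
-- def formation_de_quadruplet(g, c, r):
--     nr = len(g)
--     nc = len(g[0])
--     out = []
--     if 0 <= r < nr and 0 <= c and c + 3 < nc:
--         out.append([(r, c), (r, c + 1), (r, c + 2), (r, c + 3)])
--     if 0 <= c < nc and 0 <= r and r + 3 < nr: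
--         out.append([(r, c), (r + 1, c), (r + 2, c), (r + 3, c)])
--     if 0 <= r and r + 3 < nr and 0 <= c and c + 3 < nc:
--         out.append([(r, c), (r + 1, c + 1), (r + 2, c + 2), (r + 3, c + 3)])
--     if 0 <= r and r + 3 < nr and 0 <= c - 3 and c < nc:
--         out.append([(r + 3, c - 3), (r + 2, c - 2), (r + 1, c - 1), (r, c)])
--     return out
-- ===== Notes on version B (the rewrite author's own statement) =====
-- stated objective: simpler
-- what changed: B builds the four quadruplets directly and keeps each via a closed-form bounding-box inequality against the grid dimensions, replacing A's index/slice construction and per-cell membership filtering loop.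
-- outside the precondition, e.g. on formation_de_quadruplet([], -4, 5): A returns [], B raises IndexError
import Mathlib
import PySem

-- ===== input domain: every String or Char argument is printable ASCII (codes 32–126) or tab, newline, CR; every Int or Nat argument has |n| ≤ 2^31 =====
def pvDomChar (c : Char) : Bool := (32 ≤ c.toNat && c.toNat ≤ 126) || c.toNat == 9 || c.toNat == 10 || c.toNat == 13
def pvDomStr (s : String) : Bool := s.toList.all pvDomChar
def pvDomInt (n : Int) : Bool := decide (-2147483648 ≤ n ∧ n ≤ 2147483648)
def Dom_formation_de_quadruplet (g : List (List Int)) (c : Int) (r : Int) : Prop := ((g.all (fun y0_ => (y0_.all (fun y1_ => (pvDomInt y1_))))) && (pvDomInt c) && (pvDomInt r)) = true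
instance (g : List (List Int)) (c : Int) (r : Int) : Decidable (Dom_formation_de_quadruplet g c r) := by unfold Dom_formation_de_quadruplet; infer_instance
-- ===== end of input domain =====

-- B replaces A's index/slice quadruplet construction and per-cell membership filter loop with four
-- directly written quadruplets kept by closed-form bound inequalities (objective: simpler).

-- ===== PORT A =====
def pvLcR (r c : Int) : List (Int × Int) :=
  [(r,c-3),(r,c-2),(r,c-1),(r,c),(r,c+1),(r,c+2),(r,c+3)]

def pvLcC (r c : Int) : List (Int × Int) :=
  [(r-3,c),(r-2,c),(r-1,c),(r,c),(r+1,c),(r+2,c),(r+3,c)]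

def pvLcDiag (r c : Int) : List (Int × Int) :=
  (PySem.List.pyRange 0 7 1).foldl (fun l i => l ++ [(r-3+i, c-3+i)]) []

def pvLcDiag2 (r c : Int) : List (Int × Int) :=
  (PySem.List.pyRange 0 7 1).foldl (fun l i => l ++ [(r+3-i, c-3+i)]) []

def pvNrA (g : List (List Int)) : Int := (g.length : Int)
-- nc(g) = len(g[0]); g[0] raises IndexError on g = [], which Pre_ excludes (pyGet? is some there)
def pvNcA (g : List (List Int)) : Int := (((PySem.List.pyGet? g 0).getD []).length : Int)

def formation_de_quadruplet (g : List (List Int)) (c : Int) (r : Int) : List (List (Int × Int)) :=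
  let i1 : Int := (((PySem.List.index? (pvLcR r c) (r,c)).getD 0 : Nat) : Int)
  let l1 := PySem.List.slice (pvLcR r c) (some i1) (some (i1+4))
  let i2 : Int := (((PySem.List.index? (pvLcC r c) (r,c)).getD 0 : Nat) : Int)
  let l2 := PySem.List.slice (pvLcC r c) (some i2) (some (i2+4))
  let l3 := PySem.List.slice (pvLcDiag r c) (some i2) (some (i2+4))
  let l4 := PySem.List.slice (pvLcDiag2 r c) (some 0) (some (i2+1))
  let l := [] ++ [l1] ++ [l2] ++ [l3] ++ [l4]
  l.foldl (fun lf q =>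
    let tmp := q.foldl (fun t (k : Int × Int) =>
      t ++ [decide (0 ≤ k.2 ∧ k.2 < pvNcA g ∧ 0 ≤ k.1 ∧ k.1 < pvNrA g)]) []
    if tmp.all (fun b => b) then lf ++ [q] else lf) []

-- ===== PORT B =====
def formation_de_quadruplet_alt (g : List (List Int)) (c : Int) (r : Int) : List (List (Int × Int)) :=
  let nr : Int := (g.length : Int)
  let nc : Int := ((g.headD []).length : Int)   -- len(g[0]); g = [] excluded by Pre_
  (if 0 ≤ r ∧ r < nr ∧ 0 ≤ c ∧ c + 3 < nc then
      [[(r,c),(r,c+1),(r,c+2),(r,c+3)]] else []) ++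
  (if 0 ≤ c ∧ c < nc ∧ 0 ≤ r ∧ r + 3 < nr then
      [[(r,c),(r+1,c),(r+2,c),(r+3,c)]] else []) ++
  (if 0 ≤ r ∧ r + 3 < nr ∧ 0 ≤ c ∧ c + 3 < nc then
      [[(r,c),(r+1,c+1),(r+2,c+2),(r+3,c+3)]] else []) ++
  (if 0 ≤ r ∧ r + 3 < nr ∧ 0 ≤ c - 3 ∧ c < nc then
      [[(r+3,c-3),(r+2,c-2),(r+1,c-1),(r,c)]] else [])

-- ===== PRECONDITION & SPEC =====
-- Pre_ excludes g = [], on which A's nc(g) = len(g[0]) raises IndexError whenever some tested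
-- column index is ≥ 0 (A returns [] only in the corner where every column index is negative,
-- i.e. c < -3, reached before nc is ever evaluated); B computes len(g[0]) up front and raises there.
def Pre_formation_de_quadruplet (g : List (List Int)) (c : Int) (r : Int) : Prop := g ≠ []
instance (g : List (List Int)) (c : Int) (r : Int) : Decidable (Pre_formation_de_quadruplet g c r) := by unfold Pre_formation_de_quadruplet; infer_instance

def pvWitness_formation_de_quadruplet : List (List Int) × Int × Int := ([[0,0,0,0],[0,0,0,0],[0,0,0,0],[0,0,0,0]], 0, 0)

def Spec_formation_de_quadruplet (g : List (List Int)) (c : Int) (r : Int) (out : List (List (Int × Int))) : Prop := out = formation_de_quadruplet_alt g c r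
instance (g : List (List Int)) (c : Int) (r : Int) (out : List (List (Int × Int))) : Decidable (Spec_formation_de_quadruplet g c r out) := by unfold Spec_formation_de_quadruplet; infer_instance

-- ===== CLAIM (what is proved, stated in full; the proofs are below) =====
def Claim_equal_formation_de_quadruplet : Prop := ∀ (g : List (List Int)) (c : Int) (r : Int), Dom_formation_de_quadruplet g c r → Pre_formation_de_quadruplet g c r → Spec_formation_de_quadruplet g c r (formation_de_quadruplet g c r)

-- ===== LEMMAS AND PROOFS =====

theorem pv_main (g0 : List Int) (gs : List (List Int)) (c r : Int) :
    formation_de_quadruplet (g0::gs) c r = formation_de_quadruplet_alt (g0::gs) c r := by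
  have h1 : PySem.List.index? (pvLcR r c) (r,c) = some 3 := by
    simp [PySem.List.index?, pvLcR, List.idxOf?, List.findIdx?_cons, Prod.ext_iff,
      show ¬(c-3=c) by omega, show ¬(c-2=c) by omega, show ¬(c-1=c) by omega]
  have h2 : PySem.List.index? (pvLcC r c) (r,c) = some 3 := by
    simp [PySem.List.index?, pvLcC, List.idxOf?, List.findIdx?_cons, Prod.ext_iff,
      show ¬(r-3=r) by omega, show ¬(r-2=r) by omega, show ¬(r-1=r) by omega]
  have d1 : pvLcDiag r c = [(r-3,c-3),(r-2,c-2),(r-1,c-1),(r,c),(r+1,c+1),(r+2,c+2),(r+3,c+3)] := by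
    norm_num [pvLcDiag, show PySem.List.pyRange 0 7 1 = [0,1,2,3,4,5,6] from rfl, List.foldl]
    omega
  have d2 : pvLcDiag2 r c = [(r+3,c-3),(r+2,c-2),(r+1,c-1),(r,c),(r-1,c+1),(r-2,c+2),(r-3,c+3)] := by
    norm_num [pvLcDiag2, show PySem.List.pyRange 0 7 1 = [0,1,2,3,4,5,6] from rfl, List.foldl]
    omega
  have s1 : PySem.List.slice (pvLcR r c) (some (((3:Nat):Int))) (some (((3:Nat):Int)+4))
      = [(r,c),(r,c+1),(r,c+2),(r,c+3)] := rfl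
  have s2 : PySem.List.slice (pvLcC r c) (some (((3:Nat):Int))) (some (((3:Nat):Int)+4))
      = [(r,c),(r+1,c),(r+2,c),(r+3,c)] := rfl
  have s3 : PySem.List.slice (pvLcDiag r c) (some (((3:Nat):Int))) (some (((3:Nat):Int)+4))
      = [(r,c),(r+1,c+1),(r+2,c+2),(r+3,c+3)] := by rw [d1]; rfl
  have s4 : PySem.List.slice (pvLcDiag2 r c) (some 0) (some (((3:Nat):Int)+1))
      = [(r+3,c-3),(r+2,c-2),(r+1,c-1),(r,c)] := by rw [d2]; rfl
  simp only [formation_de_quadruplet, formation_de_quadruplet_alt, h1, h2, Option.getD_some,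
    s1, s2, s3, s4]
  simp only [pvNrA, pvNcA, PySem.List.pyGet?, PySem.List.pyIdx?,
    List.nil_append, List.headD_cons, List.length_cons]
  norm_num [List.all]
  split_ifs <;> first | rfl | (exfalso; omega)

-- ===== VERDICT (by name: the statement is the Claim_ definition above) =====
theorem formation_de_quadruplet_spec : Claim_equal_formation_de_quadruplet := by
  intro g c r _ hpre
  unfold Spec_formation_de_quadruplet
  cases g with
  | nil => exact absurd rfl hpre
  | cons g0 gs => exact pv_main g0 gs c r
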